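-- pv_equiv track=rewrite | github.com/jerenner/emsim | tests/utils/sparse_utils/autograd_ops/subset_attn/autograd_op/conftest.py | filter_valid_tensor_names
-- ===== SOURCE A (Python) =====
-- from typing import Optional, Union, Any, Literal
--
-- DIFFERENTIABLE_TENSOR_NAMES = [
--     "query_tensor",
--     "sparse_tensor_values",
--     "key_weight",
--     "value_weight",
--     "key_bias",
--     "value_bias",
--     "key_rope_encoding",
--     "key_positions",
--     "rope_freqs",
-- ]
--
-- def filter_valid_tensor_names(
--     use_rope: Union[Literal["none"], Literal["precomputed"], Literal["from_freqs"]],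
--     use_biases: bool,
-- ) -> list[str]:
--     """Filter tensor names based on the given parameters.
--
--     Returns a list of tensor names that are valid for the given combination
--     of use_rope and use_biases parameters.
--     """
--     # Start with all tensors
--     valid_tensors = list(DIFFERENTIABLE_TENSOR_NAMES)
--
--     if use_rope != "precomputed":
--         # Remove key_rope_encoding if not using precomputed RoPE
--         valid_tensors = [t for t in valid_tensors if t != "key_rope_encoding"]
--
--     if use_rope != "from_freqs":
--         # Remove position-based RoPE tensors if not computing RoPE from frequencies
--         valid_tensors = [
--             t for t in valid_tensors if t not in ["key_positions", "rope_freqs"]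
--         ]
--
--     if not use_biases:
--         # Remove bias tensors if not using biases
--         valid_tensors = [
--             t for t in valid_tensors if t not in ["key_bias", "value_bias"]
--         ]
--
--     return valid_tensors
-- ===== SOURCE B (Python) =====
-- # The passing tensors always form: BASE ++ (bias segment if enabled) ++ (rope segment
-- # for the selected mode), in exactly the source-list order, so we build the result
-- # by concatenation instead of filtering anything.
--
-- _BASE = ["query_tensor", "sparse_tensor_values", "key_weight", "value_weight"]
-- _BIAS = ["key_bias", "value_bias"]
-- _ROPE_SEGMENTS = {
--     "precomputed": ["key_rope_encoding"],
--     "from_freqs": ["key_positions", "rope_freqs"],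
-- }
--
--
-- def filter_valid_tensor_names(use_rope, use_biases):
--     """Assemble the valid-name list from its constituent segments."""
--     return _BASE + (_BIAS if use_biases else []) + _ROPE_SEGMENTS.get(use_rope, [])
-- ===== Notes on version B (the rewrite author's own statement) =====
-- stated objective: simpler
-- what changed: Replaced copy-then-three-filter-passes over the full name list with direct assembly of the result by concatenating a fixed base segment, an optional bias segment, and a rope-mode segment looked up in a dict; nothing is scanned or filtered.
import Mathlib
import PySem

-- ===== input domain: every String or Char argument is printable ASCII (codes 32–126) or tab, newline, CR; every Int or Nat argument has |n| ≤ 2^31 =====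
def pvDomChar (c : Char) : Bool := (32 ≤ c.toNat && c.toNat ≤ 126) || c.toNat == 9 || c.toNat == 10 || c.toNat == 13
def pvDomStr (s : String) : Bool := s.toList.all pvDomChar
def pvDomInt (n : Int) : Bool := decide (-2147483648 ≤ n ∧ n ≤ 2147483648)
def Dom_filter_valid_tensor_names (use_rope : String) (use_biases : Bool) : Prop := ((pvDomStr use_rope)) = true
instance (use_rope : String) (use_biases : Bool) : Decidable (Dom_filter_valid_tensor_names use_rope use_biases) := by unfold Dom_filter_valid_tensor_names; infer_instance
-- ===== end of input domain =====

-- B assembles the result by concatenating fixed segments (base ++ optional bias ++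
-- rope-mode segment) instead of A's copy-then-three-filter-passes (objective: simpler).

def DIFFERENTIABLE_TENSOR_NAMES : List String :=
  ["query_tensor", "sparse_tensor_values", "key_weight", "value_weight",
   "key_bias", "value_bias", "key_rope_encoding", "key_positions", "rope_freqs"]

-- ===== PORT A =====
def filter_valid_tensor_names (use_rope : String) (use_biases : Bool) : List String :=
  let valid_tensors := DIFFERENTIABLE_TENSOR_NAMES
  let valid_tensors :=
    if !(use_rope == "precomputed") then
      valid_tensors.filter (fun t => !(t == "key_rope_encoding"))
    else valid_tensors
  let valid_tensors :=
    if !(use_rope == "from_freqs") then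
      valid_tensors.filter (fun t => !(["key_positions", "rope_freqs"].contains t))
    else valid_tensors
  let valid_tensors :=
    if !use_biases then
      valid_tensors.filter (fun t => !(["key_bias", "value_bias"].contains t))
    else valid_tensors
  valid_tensors

-- ===== PORT B =====
def pvBase : List String :=
  ["query_tensor", "sparse_tensor_values", "key_weight", "value_weight"]

def pvBias : List String := ["key_bias", "value_bias"]

def pvRopeSegments : PySem.Dict String (List String) :=
  PySem.Dict.ofList [("precomputed", ["key_rope_encoding"]), ("from_freqs", ["key_positions", "rope_freqs"])]

def filter_valid_tensor_names_alt (use_rope : String) (use_biases : Bool) : List String :=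
  pvBase ++ (if use_biases then pvBias else []) ++ PySem.Dict.getD pvRopeSegments use_rope []

-- ===== PRECONDITION & SPEC =====
def Spec_filter_valid_tensor_names (use_rope : String) (use_biases : Bool) (out : List String) : Prop := out = filter_valid_tensor_names_alt use_rope use_biases
instance (use_rope : String) (use_biases : Bool) (out : List String) : Decidable (Spec_filter_valid_tensor_names use_rope use_biases out) := by unfold Spec_filter_valid_tensor_names; infer_instance

-- ===== CLAIM (what is proved, stated in full; the proofs are below) =====
def Claim_equal_filter_valid_tensor_names : Prop := ∀ (use_rope : String) (use_biases : Bool), Dom_filter_valid_tensor_names use_rope use_biases → Spec_filter_valid_tensor_names use_rope use_biases (filter_valid_tensor_names use_rope use_biases)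

-- ===== LEMMAS AND PROOFS =====

-- ===== VERDICT (by name: the statement is the Claim_ definition above) =====
theorem filter_valid_tensor_names_spec : Claim_equal_filter_valid_tensor_names := by
  intro u b _
  unfold Spec_filter_valid_tensor_names filter_valid_tensor_names filter_valid_tensor_names_alt
  by_cases h1 : u = "precomputed"
  · subst h1; cases b <;> decide
  · by_cases h2 : u = "from_freqs"
    · subst h2; cases b <;> decide
    · have hb1 : ("precomputed" == u) = false := by
        simpa using fun h => h1 h.symm
      have hb2 : ("from_freqs" == u) = false := by
        simpa using fun h => h2 h.symm
      have hget : PySem.Dict.getD pvRopeSegments u [] = [] := by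
        simp [pvRopeSegments, PySem.Dict.getD, hb1, hb2,
          PySem.Dict.ofList, PySem.Dict.insert, PySem.Dict.empty, PySem.Dict.update,
          PySem.Dict.get?]
      rw [hget]
      cases b <;> simp [DIFFERENTIABLE_TENSOR_NAMES, pvBase, pvBias, h1, h2, List.filter]
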